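-- pv_equiv track=rewrite | github.com/summonholmes/em-dna | em_functional/em_motifs.py | init_background_motif_counts
-- ===== SOURCE A (Python) =====
-- def init_background_motif_counts(len_list, count_bases, motif):
--     background_actg = {
--         "background_a": count_bases[0],
--         "background_c": count_bases[1],
--         "background_t": count_bases[2],
--         "background_g": count_bases[3]
--     }
--     for i in range(len_list):
--         background_actg["background_a"] -= motif[i].count('A')
--         background_actg["background_c"] -= motif[i].count('C')
--         background_actg["background_t"] -= motif[i].count('T')
--         background_actg["background_g"] -= motif[i].count('G')
--     return background_actg
-- ===== SOURCE B (Python) =====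
-- def init_background_motif_counts(len_list, count_bases, motif):
--     # Flatten the selected motifs into one character stream, then make a single
--     # pass decrementing four scalar registers via an if/elif dispatch.
--     stream = "".join(motif[i] for i in range(len_list))
--     a, c, t, g = count_bases[0], count_bases[1], count_bases[2], count_bases[3]
--     for ch in stream:
--         if ch == 'A':
--             a -= 1
--         elif ch == 'C':
--             c -= 1
--         elif ch == 'T':
--             t -= 1
--         elif ch == 'G':
--             g -= 1
--     return {
--         "background_a": a,
--         "background_c": c,
--         "background_t": t,
--         "background_g": g,
--     }
-- ===== Notes on version B (the rewrite author's own statement) =====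
-- stated objective: alternative
-- what changed: B flattens the selected motifs into one character stream and makes a single pass with four scalar registers and an if/elif dispatch, instead of A's four str.count scans per motif subtracted into a mutated dict; the result dict is built once at the end.
-- outside the precondition, e.g. on init_background_motif_counts(1, [1, 2, 3], ['A']): A raises IndexError, B raises IndexError; on init_background_motif_counts(2, [1, 2, 3, 4], ['A']): A raises IndexError, B raises IndexError
import Mathlib
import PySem

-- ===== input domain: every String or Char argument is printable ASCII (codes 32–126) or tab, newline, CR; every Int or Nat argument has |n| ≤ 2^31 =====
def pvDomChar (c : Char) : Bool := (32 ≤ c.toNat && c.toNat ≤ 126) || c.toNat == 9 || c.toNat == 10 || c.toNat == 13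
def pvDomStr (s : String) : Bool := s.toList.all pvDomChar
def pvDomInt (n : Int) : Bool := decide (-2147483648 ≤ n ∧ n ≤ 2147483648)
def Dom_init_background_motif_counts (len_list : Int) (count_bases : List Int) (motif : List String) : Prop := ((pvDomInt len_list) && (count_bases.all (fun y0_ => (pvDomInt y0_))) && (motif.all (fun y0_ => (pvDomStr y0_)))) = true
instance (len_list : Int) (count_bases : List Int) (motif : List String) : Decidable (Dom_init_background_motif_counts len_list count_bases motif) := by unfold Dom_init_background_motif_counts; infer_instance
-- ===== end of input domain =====

-- B flattens the selected motifs into one character stream and makes a single pass with four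
-- scalar registers and an if/elif dispatch, building the result dict once at the end
-- (objective: alternative).

-- ===== PORT A =====
def init_background_motif_counts (len_list : Int) (count_bases : List Int) (motif : List String) : List (String × Int) :=
  let d : PySem.Dict String Int := PySem.Dict.ofList
    [("background_a", PySem.List.pyGetD count_bases 0 0),
     ("background_c", PySem.List.pyGetD count_bases 1 0),
     ("background_t", PySem.List.pyGetD count_bases 2 0),
     ("background_g", PySem.List.pyGetD count_bases 3 0)]
  let d := (PySem.List.pyRange 0 len_list 1).foldl (fun d i =>
    let m := PySem.List.pyGetD motif i ""
    let d := d.modify "background_a" 0 (fun v => v - (PySem.Str.count m "A" : Int))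
    let d := d.modify "background_c" 0 (fun v => v - (PySem.Str.count m "C" : Int))
    let d := d.modify "background_t" 0 (fun v => v - (PySem.Str.count m "T" : Int))
    d.modify "background_g" 0 (fun v => v - (PySem.Str.count m "G" : Int))) d
  d.items

-- ===== PORT B =====
def init_background_motif_counts_alt (len_list : Int) (count_bases : List Int) (motif : List String) : List (String × Int) :=
  let stream : List Char :=
    (((PySem.List.pyRange 0 len_list 1).map (fun i => PySem.List.pyGetD motif i "")).map String.toList).flatten
  let acc := stream.foldl (fun (acc : Int × Int × Int × Int) ch =>
      if ch = 'A' then (acc.1 - 1, acc.2.1, acc.2.2.1, acc.2.2.2)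
      else if ch = 'C' then (acc.1, acc.2.1 - 1, acc.2.2.1, acc.2.2.2)
      else if ch = 'T' then (acc.1, acc.2.1, acc.2.2.1 - 1, acc.2.2.2)
      else if ch = 'G' then (acc.1, acc.2.1, acc.2.2.1, acc.2.2.2 - 1)
      else acc)
    (PySem.List.pyGetD count_bases 0 0, PySem.List.pyGetD count_bases 1 0,
     PySem.List.pyGetD count_bases 2 0, PySem.List.pyGetD count_bases 3 0)
  [("background_a", acc.1), ("background_c", acc.2.1),
   ("background_t", acc.2.2.1), ("background_g", acc.2.2.2)]

-- ===== PRECONDITION & SPEC =====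
-- Pre_: A raises IndexError when count_bases has fewer than 4 entries or len_list exceeds len(motif).
def Pre_init_background_motif_counts (len_list : Int) (count_bases : List Int) (motif : List String) : Prop :=
  4 ≤ count_bases.length ∧ len_list ≤ (motif.length : Int)
instance (len_list : Int) (count_bases : List Int) (motif : List String) : Decidable (Pre_init_background_motif_counts len_list count_bases motif) := by unfold Pre_init_background_motif_counts; infer_instance
def pvWitness_init_background_motif_counts : Int × List Int × List String := (2, [10, 9, 8, 7], ["ACT", "GGA"])

def Spec_init_background_motif_counts (len_list : Int) (count_bases : List Int) (motif : List String) (out : List (String × Int)) : Prop := out = init_background_motif_counts_alt len_list count_bases motif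
instance (len_list : Int) (count_bases : List Int) (motif : List String) (out : List (String × Int)) : Decidable (Spec_init_background_motif_counts len_list count_bases motif out) := by unfold Spec_init_background_motif_counts; infer_instance

-- ===== CLAIM (what is proved, stated in full; the proofs are below) =====
def Claim_equal_init_background_motif_counts : Prop := ∀ (len_list : Int) (count_bases : List Int) (motif : List String), Dom_init_background_motif_counts len_list count_bases motif → Pre_init_background_motif_counts len_list count_bases motif → Spec_init_background_motif_counts len_list count_bases motif (init_background_motif_counts len_list count_bases motif)

-- ===== LEMMAS AND PROOFS =====

-- A's loop keeps the dict a four-entry literal; one induction gives its final items.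
theorem aLoop_items (ms : List String) (a c t g : Int) :
    ((ms.foldl (fun d m =>
        let d := PySem.Dict.modify d "background_a" 0 (fun v => v - (PySem.Str.count m "A" : Int))
        let d := PySem.Dict.modify d "background_c" 0 (fun v => v - (PySem.Str.count m "C" : Int))
        let d := PySem.Dict.modify d "background_t" 0 (fun v => v - (PySem.Str.count m "T" : Int))
        PySem.Dict.modify d "background_g" 0 (fun v => v - (PySem.Str.count m "G" : Int)))
      (PySem.Dict.mk
        [("background_a", a), ("background_c", c), ("background_t", t), ("background_g", g)])) : PySem.Dict String Int).items
    = [("background_a", a - ((ms.map (fun m => (PySem.Str.count m "A" : Int))).sum)),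
       ("background_c", c - ((ms.map (fun m => (PySem.Str.count m "C" : Int))).sum)),
       ("background_t", t - ((ms.map (fun m => (PySem.Str.count m "T" : Int))).sum)),
       ("background_g", g - ((ms.map (fun m => (PySem.Str.count m "G" : Int))).sum))] := by
  induction ms generalizing a c t g with
  | nil => simp
  | cons m ms ih =>
    simp only [List.foldl_cons, List.map_cons, List.sum_cons]
    rw [show ∀ (x y z w : Int), (PySem.Dict.modify (PySem.Dict.modify (PySem.Dict.modify (PySem.Dict.modify
        (PySem.Dict.mk [("background_a", x), ("background_c", y), ("background_t", z), ("background_g", w)])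
        "background_a" 0 (fun v => v - (PySem.Str.count m "A" : Int)))
        "background_c" 0 (fun v => v - (PySem.Str.count m "C" : Int)))
        "background_t" 0 (fun v => v - (PySem.Str.count m "T" : Int)))
        "background_g" 0 (fun v => v - (PySem.Str.count m "G" : Int)))
      = PySem.Dict.mk [("background_a", x - (PySem.Str.count m "A" : Int)),
          ("background_c", y - (PySem.Str.count m "C" : Int)),
          ("background_t", z - (PySem.Str.count m "T" : Int)),
          ("background_g", w - (PySem.Str.count m "G" : Int))] from fun x y z w => by
        simp [PySem.Dict.modify, PySem.Dict.getD, PySem.Dict.get?, PySem.Dict.insert,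
          PySem.Dict.contains]]
    rw [ih]
    ring_nf

-- B's single scan with four registers: each register ends a start value minus a character count.
theorem bScan (cs : List Char) (a c t g : Int) :
    cs.foldl (fun (acc : Int × Int × Int × Int) ch =>
      if ch = 'A' then (acc.1 - 1, acc.2.1, acc.2.2.1, acc.2.2.2)
      else if ch = 'C' then (acc.1, acc.2.1 - 1, acc.2.2.1, acc.2.2.2)
      else if ch = 'T' then (acc.1, acc.2.1, acc.2.2.1 - 1, acc.2.2.2)
      else if ch = 'G' then (acc.1, acc.2.1, acc.2.2.1, acc.2.2.2 - 1)
      else acc) (a, c, t, g)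
    = (a - (cs.count 'A' : Int), c - (cs.count 'C' : Int),
       t - (cs.count 'T' : Int), g - (cs.count 'G' : Int)) := by
  induction cs generalizing a c t g with
  | nil => simp
  | cons ch cs ih =>
    simp only [List.foldl_cons]
    by_cases hA : ch = 'A'
    · subst hA; simp [ih]; ring
    · by_cases hC : ch = 'C'
      · subst hC; simp [ih]; ring
      · by_cases hT : ch = 'T'
        · subst hT; simp [ih]; ring
        · by_cases hG : ch = 'G'
          · subst hG; simp [ih]; ring
          · simp [hA, hC, hT, hG, ih]

-- helper for str_count_single: single-character count.go is List.count
theorem go_single (ch : Char) (fuel : Nat) : ∀ (cs : List Char) (acc : Nat), cs.length ≤ fuel →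
    PySem.Chars.count.go [ch] fuel cs acc = acc + cs.count ch := by
  induction fuel with
  | zero =>
    intro cs acc h
    have : cs = [] := List.eq_nil_of_length_eq_zero (Nat.le_zero.mp h)
    subst this; simp [PySem.Chars.count.go]
  | succ n ih =>
    intro cs acc h
    cases cs with
    | nil => simp [PySem.Chars.count.go]
    | cons x t =>
      rw [PySem.Chars.count.go]
      by_cases hx : x = ch
      · subst hx
        simp [List.isPrefixOf, ih t (acc + 1) (by simpa using Nat.le_of_succ_le_succ h)]
        omega
      · simp [List.isPrefixOf, Ne.symm hx, hx, ih t acc (by simpa using Nat.le_of_succ_le_succ h)]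

-- single-character str.count is the List.count of the characters
theorem str_count_single (m : String) (ch : Char) :
    PySem.Str.count m (String.ofList [ch]) = m.toList.count ch := by
  have h1 : (String.ofList [ch]).toList = [ch] := by simp
  simp [PySem.Str.count_eq, PySem.Chars.count, h1]
  rw [show m.length = m.toList.length from rfl]
  simpa using go_single ch m.toList.length m.toList 0 le_rfl

-- counting a character in the flattened stream = summing per-string single-character str.counts
theorem count_flatten_eq (ms : List String) (ch : Char) :
    (((ms.map String.toList).flatten.count ch : Int))
    = ((ms.map (fun m => (PySem.Str.count m (String.ofList [ch]) : Int))).sum) := by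
  induction ms with
  | nil => simp
  | cons m ms ih =>
    simp only [List.map_cons, List.flatten_cons, List.count_append, List.sum_cons,
      str_count_single] at ih ⊢
    push_cast
    rw [ih]

-- ===== VERDICT (by name: the statement is the Claim_ definition above) =====
theorem init_background_motif_counts_spec : Claim_equal_init_background_motif_counts := by
  intro len_list count_bases motif _ _
  unfold Spec_init_background_motif_counts init_background_motif_counts init_background_motif_counts_alt
  simp only []
  rw [show (PySem.Dict.ofList
        [("background_a", PySem.List.pyGetD count_bases 0 0),
         ("background_c", PySem.List.pyGetD count_bases 1 0),
         ("background_t", PySem.List.pyGetD count_bases 2 0),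
         ("background_g", PySem.List.pyGetD count_bases 3 0)] : PySem.Dict String Int)
      = PySem.Dict.mk
        [("background_a", PySem.List.pyGetD count_bases 0 0),
         ("background_c", PySem.List.pyGetD count_bases 1 0),
         ("background_t", PySem.List.pyGetD count_bases 2 0),
         ("background_g", PySem.List.pyGetD count_bases 3 0)] from rfl]
  have eA : List.foldl (fun (d : PySem.Dict String Int) (i : Int) =>
        let m := PySem.List.pyGetD motif i ""
        let d := PySem.Dict.modify d "background_a" 0 (fun v => v - (PySem.Str.count m "A" : Int))
        let d := PySem.Dict.modify d "background_c" 0 (fun v => v - (PySem.Str.count m "C" : Int))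
        let d := PySem.Dict.modify d "background_t" 0 (fun v => v - (PySem.Str.count m "T" : Int))
        PySem.Dict.modify d "background_g" 0 (fun v => v - (PySem.Str.count m "G" : Int)))
      (PySem.Dict.mk
        [("background_a", PySem.List.pyGetD count_bases 0 0),
         ("background_c", PySem.List.pyGetD count_bases 1 0),
         ("background_t", PySem.List.pyGetD count_bases 2 0),
         ("background_g", PySem.List.pyGetD count_bases 3 0)])
      (PySem.List.pyRange 0 len_list 1)
    = List.foldl (fun (d : PySem.Dict String Int) (m : String) =>
        let d := PySem.Dict.modify d "background_a" 0 (fun v => v - (PySem.Str.count m "A" : Int))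
        let d := PySem.Dict.modify d "background_c" 0 (fun v => v - (PySem.Str.count m "C" : Int))
        let d := PySem.Dict.modify d "background_t" 0 (fun v => v - (PySem.Str.count m "T" : Int))
        PySem.Dict.modify d "background_g" 0 (fun v => v - (PySem.Str.count m "G" : Int)))
      (PySem.Dict.mk
        [("background_a", PySem.List.pyGetD count_bases 0 0),
         ("background_c", PySem.List.pyGetD count_bases 1 0),
         ("background_t", PySem.List.pyGetD count_bases 2 0),
         ("background_g", PySem.List.pyGetD count_bases 3 0)])
      ((PySem.List.pyRange 0 len_list 1).map (fun i => PySem.List.pyGetD motif i "")) := by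
    rw [List.foldl_map]
  rw [eA, aLoop_items, bScan]
  rw [show ("A" : String) = String.ofList ['A'] from rfl, show ("C" : String) = String.ofList ['C'] from rfl,
      show ("T" : String) = String.ofList ['T'] from rfl, show ("G" : String) = String.ofList ['G'] from rfl]
  rw [← count_flatten_eq, ← count_flatten_eq, ← count_flatten_eq, ← count_flatten_eq]
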